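-- pv_equiv track=rewrite | github.com/karahcheev/karvio | backend/app/modules/performance/adapters/pytest_benchmark_json.py | _warmup_aggregate_bool_flags
-- ===== SOURCE A (Python) =====
-- def _warmup_aggregate_bool_flags(flags: list[bool]) -> bool | None:
--     if not flags:
--         return None
--     if all(value is True for value in flags):
--         return True
--     if all(value is False for value in flags):
--         return False
--     return None
-- ===== SOURCE B (Python) =====
-- def _warmup_aggregate_bool_flags(flags: list[bool]) -> bool | None:
--     distinct = set(flags)
--     if len(distinct) == 1:
--         return distinct.pop()
--     return None
-- ===== Notes on version B (the rewrite author's own statement) =====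
-- stated objective: simpler
-- what changed: Instead of A's empty guard plus two short-circuiting all() identity scans, B deduplicates the flags into a set and returns its sole element when the set is a singleton, None otherwise (empty and mixed collapse into one case).
import Mathlib
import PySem

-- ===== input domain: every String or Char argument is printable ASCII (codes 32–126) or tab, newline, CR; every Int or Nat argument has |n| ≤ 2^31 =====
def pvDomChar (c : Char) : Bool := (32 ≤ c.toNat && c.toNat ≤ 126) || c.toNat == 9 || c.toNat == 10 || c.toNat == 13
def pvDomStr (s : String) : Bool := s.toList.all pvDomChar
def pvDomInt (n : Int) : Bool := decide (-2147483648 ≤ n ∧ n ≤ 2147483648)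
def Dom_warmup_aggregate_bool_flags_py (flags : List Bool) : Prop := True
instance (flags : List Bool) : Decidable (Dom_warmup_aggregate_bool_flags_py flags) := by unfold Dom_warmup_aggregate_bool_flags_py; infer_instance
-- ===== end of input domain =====

-- B deduplicates into a set and decides by its cardinality, instead of A's two all() scans; objective: simpler.

-- ===== PORT A =====
-- Literal port of A: empty guard, then the two all-scans in order.
def warmup_aggregate_bool_flags_py (flags : List Bool) : Option Bool :=
  if flags = [] then none
  else if flags.all (fun value => value = true) then some true
  else if flags.all (fun value => value = false) then some false
  else none

-- ===== PORT B =====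
-- Port of B: set(flags), singleton check, then pop. On a singleton set, pop()
-- is order-independent (it returns the unique element), ported as head?.
def warmup_aggregate_bool_flags_py_alt (flags : List Bool) : Option Bool :=
  let distinct : PySem.Set Bool := PySem.Set.ofList flags
  if PySem.Set.len distinct = 1 then distinct.head? else none

-- ===== PRECONDITION & SPEC =====
def Spec_warmup_aggregate_bool_flags_py (flags : List Bool) (out : Option Bool) : Prop := out = warmup_aggregate_bool_flags_py_alt flags
instance (flags : List Bool) (out : Option Bool) : Decidable (Spec_warmup_aggregate_bool_flags_py flags out) := by unfold Spec_warmup_aggregate_bool_flags_py; infer_instance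

-- ===== CLAIM (what is proved, stated in full; the proofs are below) =====
def Claim_equal_warmup_aggregate_bool_flags_py : Prop := ∀ (flags : List Bool), Dom_warmup_aggregate_bool_flags_py flags → Spec_warmup_aggregate_bool_flags_py flags (warmup_aggregate_bool_flags_py flags)

-- ===== LEMMAS AND PROOFS =====

-- set(flags) = [x] exactly when flags is nonempty and constantly x.
theorem pvOfList_singleton (flags : List Bool) (x : Bool)
    (h : PySem.Set.ofList flags = [x]) : flags ≠ [] ∧ ∀ y ∈ flags, y = x := by
  constructor
  · intro hnil; rw [hnil] at h; simp [PySem.Set.ofList] at h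
  · intro y hy
    have : y ∈ PySem.Set.ofList flags := (PySem.Set.mem_ofList flags y).2 hy
    rw [h] at this; simpa using this

theorem pvMem_of_mem_ofList (flags : List Bool) (x : Bool)
    (h : x ∈ PySem.Set.ofList flags) : x ∈ flags := (PySem.Set.mem_ofList flags x).1 h

-- ===== VERDICT (by name: the statement is the Claim_ definition above) =====
theorem warmup_aggregate_bool_flags_py_spec : Claim_equal_warmup_aggregate_bool_flags_py := by
  intro flags _
  unfold Spec_warmup_aggregate_bool_flags_py
  unfold warmup_aggregate_bool_flags_py warmup_aggregate_bool_flags_py_alt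
  cases hd : PySem.Set.ofList flags with
  | nil =>
    have hnil : flags = [] := by
      cases flags with
      | nil => rfl
      | cons a t =>
        exfalso
        have : a ∈ PySem.Set.ofList (a :: t) := (PySem.Set.mem_ofList (a :: t) a).2 (by simp)
        rw [hd] at this; simp at this
    simp [hnil, PySem.Set.len]
  | cons x t =>
    cases t with
    | nil =>
      obtain ⟨hne, hconst⟩ := pvOfList_singleton flags x hd
      have hx : x ∈ flags := pvMem_of_mem_ofList flags x (by rw [hd]; simp)
      cases x with
      | true =>
        have hfn : false ∉ flags := by
          intro h; exact absurd (hconst false h) (by simp)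
        simp [hne, PySem.Set.len, hx, hfn]
      | false =>
        have htn : true ∉ flags := by
          intro h; exact absurd (hconst true h) (by simp)
        simp [hne, PySem.Set.len, hx, htn]
    | cons y u =>
      have hnd : (PySem.Set.ofList flags).Nodup := PySem.Set.nodup_ofList flags
      rw [hd] at hnd
      have hxy : x ≠ y := by
        intro hxy; rw [hxy] at hnd; simp at hnd
      have hxm : x ∈ flags := pvMem_of_mem_ofList flags x (by rw [hd]; simp)
      have hym : y ∈ flags := pvMem_of_mem_ofList flags y (by rw [hd]; simp)
      have hne : flags ≠ [] := by intro h; rw [h] at hxm; simp at hxm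
      have htm : true ∈ flags := by cases x <;> cases y <;> first | exact hxm | exact hym | simp at hxy
      have hfm : false ∈ flags := by cases x <;> cases y <;> first | exact hxm | exact hym | simp at hxy
      have hlen : PySem.Set.len (x :: y :: u) ≠ 1 := by
        simp [PySem.Set.len]; omega
      have hlen2 : ¬ ((u.length : Int) + 1 = 0) := by omega
      simp [hne, htm, hfm, PySem.Set.len, hlen2]
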